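-- pv_equiv track=rewrite | github.com/IAmCheese1231/NexHacksPolywatch | utils.py | tokenize_title
-- ===== SOURCE A (Python) =====
-- from typing import Iterable, List, Tuple
--
-- def tokenize_title(title: str) -> List[str]:
--     if title is None:
--         return []
--     t = str(title).lower()
--     out: List[str] = []
--     cur: List[str] = []
--     for ch in t:
--         if ch.isalnum():
--             cur.append(ch)
--         else:
--             if cur:
--                 out.append("".join(cur))
--                 cur = []
--     if cur:
--         out.append("".join(cur))
--     return [w for w in out if len(w) >= 3]
-- ===== SOURCE B (Python) =====
-- def tokenize_title(title):
--     if title is None: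
--         return []
--     t = str(title).lower()
--     s = ''.join(ch if ch.isalnum() else ' ' for ch in t)
--     return [w for w in s.split() if len(w) >= 3]
-- ===== Notes on version B (the rewrite author's own statement) =====
-- stated objective: simpler
-- what changed: Replaces A's manual character buffer with boundary flushing by a two-stage pass: map non-alphanumeric characters to spaces, then delegate token grouping to str.split().
import Mathlib
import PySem

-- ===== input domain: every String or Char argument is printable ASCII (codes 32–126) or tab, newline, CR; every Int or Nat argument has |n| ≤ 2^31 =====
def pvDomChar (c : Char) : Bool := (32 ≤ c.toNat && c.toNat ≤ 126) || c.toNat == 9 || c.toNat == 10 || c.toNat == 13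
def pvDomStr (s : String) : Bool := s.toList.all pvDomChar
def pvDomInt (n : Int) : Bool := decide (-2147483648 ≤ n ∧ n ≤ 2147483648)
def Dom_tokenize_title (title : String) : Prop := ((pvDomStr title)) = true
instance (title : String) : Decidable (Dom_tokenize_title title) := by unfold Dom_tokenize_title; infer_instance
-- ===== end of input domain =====

-- B replaces A's manual buffer-and-flush loop by mapping non-alphanumeric chars to
-- spaces and delegating token grouping to str.split() (objective: simpler).

-- ===== PORT A =====
-- one loop step of A: append alnum chars to cur, flush a non-empty cur on a boundary
def tokAStep (s : List (List Char) × List Char) (ch : Char) : List (List Char) × List Char :=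
  if PySem.Chars.isalnum ch then (s.1, s.2 ++ [ch])
  else if s.2 ≠ [] then (s.1 ++ [s.2], []) else s

def tokenize_title (title : String) : List String :=
  let t := (PySem.Str.lower title).toList
  let oc := t.foldl tokAStep ([], [])
  let out := if oc.2 ≠ [] then oc.1 ++ [oc.2] else oc.1
  (out.map String.mk).filter (fun w => decide (3 ≤ PySem.Str.len w))

-- ===== PORT B =====
def tokenize_title_alt (title : String) : List String :=
  let t := (PySem.Str.lower title).toList
  let s := t.map (fun ch => if PySem.Chars.isalnum ch then ch else ' ')
  ((PySem.Chars.split₀ s).map String.mk).filter (fun w => decide (3 ≤ PySem.Str.len w))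

-- ===== PRECONDITION & SPEC =====
def Spec_tokenize_title (title : String) (out : List String) : Prop := out = tokenize_title_alt title
instance (title : String) (out : List String) : Decidable (Spec_tokenize_title title out) := by unfold Spec_tokenize_title; infer_instance

-- ===== CLAIM (what is proved, stated in full; the proofs are below) =====
def Claim_equal_tokenize_title : Prop := ∀ (title : String), Dom_tokenize_title title → Spec_tokenize_title title (tokenize_title title)

-- ===== LEMMAS AND PROOFS =====

lemma char_le_iff (a b : Char) : a ≤ b ↔ a.toNat ≤ b.toNat := by
  rw [Char.le_def, UInt32.le_iff_toNat_le]; rfl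

lemma isalnum_not_isspace (c : Char) (h : PySem.Chars.isalnum c = true) :
    PySem.Chars.isspace c = false := by
  cases hs : PySem.Chars.isspace c with
  | false => rfl
  | true =>
    exfalso
    simp only [PySem.Chars.isalnum, PySem.Chars.isalpha, PySem.Chars.isdigit,
      PySem.Chars.isupper, PySem.Chars.islower, Bool.or_eq_true, Bool.and_eq_true,
      decide_eq_true_eq, char_le_iff] at h
    simp only [PySem.Chars.isspace, Bool.or_eq_true, Bool.and_eq_true, decide_eq_true_eq] at hs
    have e1 : ('A' : Char).toNat = 65 := rfl
    have e2 : ('Z' : Char).toNat = 90 := rfl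
    have e3 : ('a' : Char).toNat = 97 := rfl
    have e4 : ('z' : Char).toNat = 122 := rfl
    have e5 : ('0' : Char).toNat = 48 := rfl
    have e6 : ('9' : Char).toNat = 57 := rfl
    rw [e1, e2, e3, e4, e5, e6] at h
    omega

lemma space_isspace : PySem.Chars.isspace ' ' = true := by decide

-- equation lemmas for PySem.Chars.split₀.go, proved once and cited below
lemma go_nil (cur : List Char) (acc : List (List Char)) :
    PySem.Chars.split₀.go [] cur acc =
      if cur.isEmpty then acc.reverse else (cur.reverse :: acc).reverse := rfl

lemma go_cons (c : Char) (rest cur : List Char) (acc : List (List Char)) :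
    PySem.Chars.split₀.go (c :: rest) cur acc =
      if PySem.Chars.isspace c then
        (if cur.isEmpty then PySem.Chars.split₀.go rest [] acc
         else PySem.Chars.split₀.go rest [] (cur.reverse :: acc))
      else PySem.Chars.split₀.go rest (c :: cur) acc := rfl

-- the invariant tying A's (out, cur) fold state to split₀.go's reversed accumulators
lemma go_eq_fold (cs : List Char) (out : List (List Char)) (cur : List Char) :
    PySem.Chars.split₀.go
        (cs.map (fun ch => if PySem.Chars.isalnum ch then ch else ' '))
        cur.reverse out.reverse =
      (let oc := cs.foldl tokAStep (out, cur);
       if oc.2 ≠ [] then oc.1 ++ [oc.2] else oc.1) := by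
  induction cs generalizing out cur with
  | nil =>
      rw [List.map_nil, go_nil, List.foldl_nil]
      by_cases h : cur = [] <;> simp [h]
  | cons c rest ih =>
      rw [List.map_cons, List.foldl_cons]
      by_cases ha : PySem.Chars.isalnum c = true
      · rw [if_pos ha, go_cons, if_neg (by rw [isalnum_not_isspace c ha]; exact Bool.false_ne_true)]
        have hrw : c :: cur.reverse = (cur ++ [c]).reverse := by simp
        rw [hrw, ih]
        simp [tokAStep, ha]
      · rw [if_neg ha, go_cons, if_pos space_isspace]
        by_cases hc : cur = []
        · subst hc
          rw [if_pos (by rfl)]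
          have h2 := ih out []
          rw [List.reverse_nil] at h2
          rw [h2]
          simp [tokAStep, ha]
        · rw [if_neg (by simp [hc])]
          have h1 : cur.reverse.reverse :: out.reverse = (out ++ [cur]).reverse := by simp
          rw [h1]
          have h2 := ih (out ++ [cur]) []
          rw [List.reverse_nil] at h2
          rw [h2]
          simp [tokAStep, ha, hc]

-- ===== VERDICT (by name: the statement is the Claim_ definition above) =====
theorem tokenize_title_spec : Claim_equal_tokenize_title := by
  intro title _
  have h := go_eq_fold (PySem.Str.lower title).toList [] []
  simp only [List.reverse_nil] at h
  show tokenize_title title = tokenize_title_alt title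
  simp only [tokenize_title, tokenize_title_alt, PySem.Chars.split₀, h]
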